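-- pv_equiv track=rewrite | github.com/arambarnett/video-editor | transcriber1.py | style_transcript_slow
-- ===== SOURCE A (Python) =====
-- def style_transcript_slow(transcript):
--     # Add smooth transitions and emphasis
--     words = transcript.split()
--     styled = []
--     for i, word in enumerate(words):
--         if i % 10 == 0:
--             styled.append(f"[SLOW ZOOM] {word}")
--         else:
--             styled.append(word)
--     return " ".join(styled)
-- ===== SOURCE B (Python) =====
-- def style_transcript_slow(transcript):
--     # Strided in-place marking: only visit every 10th word, mutate the list, join once.
--     words = transcript.split()
--     for i in range(0, len(words), 10):
--         words[i] = f"[SLOW ZOOM] {words[i]}"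
--     return " ".join(words)
-- ===== Notes on version B (the rewrite author's own statement) =====
-- stated objective: simpler
-- what changed: Replaces the enumerate-over-all-words loop with a per-word modulo branch building a fresh list by a strided range(0, len, 10) loop that mutates only the marked positions in place, then joins once.
import Mathlib
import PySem

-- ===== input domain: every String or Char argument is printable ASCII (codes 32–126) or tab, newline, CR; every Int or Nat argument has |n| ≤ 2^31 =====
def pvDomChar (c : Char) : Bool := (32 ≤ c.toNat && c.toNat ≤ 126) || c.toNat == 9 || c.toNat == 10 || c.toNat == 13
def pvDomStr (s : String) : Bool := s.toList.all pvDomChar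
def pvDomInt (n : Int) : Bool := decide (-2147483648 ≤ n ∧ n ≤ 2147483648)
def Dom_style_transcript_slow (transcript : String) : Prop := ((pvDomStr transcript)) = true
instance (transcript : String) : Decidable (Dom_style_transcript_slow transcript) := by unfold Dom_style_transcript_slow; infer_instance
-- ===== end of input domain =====

-- B replaces A's per-word modulo branch over an enumerated copy with a strided
-- range(0, len, 10) loop mutating only the marked positions in place (objective: simpler).

-- ===== PORT A =====
def style_transcript_slow (transcript : String) : String :=
  let words := PySem.Str.split₀ transcript
  let styled := (PySem.List.enumerate words).foldl
    (fun styled iw =>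
      if iw.1 % 10 == 0 then styled ++ ["[SLOW ZOOM] " ++ iw.2]
      else styled ++ [iw.2]) []
  PySem.Str.join " " styled

-- ===== PORT B =====
-- words[i] = … : i comes from range(0, len(words), 10), so 0 ≤ i < len(words);
-- List.set i.toNat with PySem.List.pyGetD for the read is exact there.
def style_transcript_slow_alt (transcript : String) : String :=
  let words := PySem.Str.split₀ transcript
  let words := (PySem.List.pyRange 0 (PySem.List.len words) 10).foldl
    (fun ws i => ws.set i.toNat ("[SLOW ZOOM] " ++ PySem.List.pyGetD ws i "")) words
  PySem.Str.join " " words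

-- ===== PRECONDITION & SPEC =====
def Spec_style_transcript_slow (transcript : String) (out : String) : Prop := out = style_transcript_slow_alt transcript
instance (transcript : String) (out : String) : Decidable (Spec_style_transcript_slow transcript out) := by unfold Spec_style_transcript_slow; infer_instance

-- ===== CLAIM (what is proved, stated in full; the proofs are below) =====
def Claim_equal_style_transcript_slow : Prop := ∀ (transcript : String), Dom_style_transcript_slow transcript → Spec_style_transcript_slow transcript (style_transcript_slow transcript)

-- ===== LEMMAS AND PROOFS =====

-- A's accumulator loop is a map over the enumeration.
theorem pv_foldl_app {α β : Type} (l : List α) (g : α → β) (acc : List β) :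
    l.foldl (fun a x => a ++ [g x]) acc = acc ++ l.map g := by
  induction l generalizing acc with
  | nil => simp
  | cons x xs ih => simp [ih]

-- B's strided set-loop, element by element.
theorem pv_fold_set (J : List Int) (ws : List String)
    (hnd : J.Nodup) (hmem : ∀ i ∈ J, 0 ≤ i ∧ i < (ws.length : Int)) :
    (J.foldl (fun ws i => ws.set i.toNat ("[SLOW ZOOM] " ++ PySem.List.pyGetD ws i "")) ws).length = ws.length ∧
    ∀ (k : Nat), k < ws.length →
      (J.foldl (fun ws i => ws.set i.toNat ("[SLOW ZOOM] " ++ PySem.List.pyGetD ws i "")) ws).getD k "" =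
        if ((k : Int) ∈ J) then "[SLOW ZOOM] " ++ ws.getD k "" else ws.getD k "" := by
  induction J generalizing ws with
  | nil => simp
  | cons j J ih =>
    obtain ⟨hj0, hjlt⟩ := hmem j (List.mem_cons_self ..)
    have hjn : j.toNat < ws.length := by omega
    have hnd' : J.Nodup := hnd.of_cons
    have hjJ : j ∉ J := (List.nodup_cons.mp hnd).1
    set ws' := ws.set j.toNat ("[SLOW ZOOM] " ++ PySem.List.pyGetD ws j "") with hws'
    have hlen' : ws'.length = ws.length := by simp [hws']
    have hmem' : ∀ i ∈ J, 0 ≤ i ∧ i < (ws'.length : Int) := by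
      intro i hi; have := hmem i (List.mem_cons_of_mem _ hi); omega
    obtain ⟨ihlen, ihget⟩ := ih ws' hnd' hmem'
    refine ⟨by simp only [List.foldl_cons, ← hws', ihlen, hlen'], ?_⟩
    intro k hk
    have hget := ihget k (by omega)
    simp only [List.foldl_cons, ← hws'] at hget ⊢
    rw [hget]
    have hread : PySem.List.pyGetD ws j "" = ws.getD j.toNat "" := by
      rw [PySem.List.pyGetD_of_nonneg ws "" hj0]
    have hread2 : "[SLOW ZOOM] " ++ PySem.List.pyGetD ws j "" = "[SLOW ZOOM] " ++ ws[j.toNat] := by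
      rw [hread, List.getD_eq_getElem _ _ hjn]
    have hset : ∀ (m : Nat), m < ws.length →
        ws'.getD m "" = if m = j.toNat then "[SLOW ZOOM] " ++ ws.getD j.toNat "" else ws.getD m "" := by
      intro m hm
      rw [List.getD_eq_getElem _ _ (by omega : m < ws'.length), List.getD_eq_getElem _ _ hm,
          List.getD_eq_getElem _ _ hjn]
      simp only [hws', List.getElem_set, hread2]
      by_cases h : m = j.toNat
      · rw [if_pos h.symm, if_pos h]
      · rw [if_neg (fun hh => h hh.symm), if_neg h]
    by_cases hkJ : (k : Int) ∈ J
    · have hkj : k ≠ j.toNat := by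
        intro h; subst h
        exact hjJ (by rwa [Int.toNat_of_nonneg hj0] at hkJ)
      rw [if_pos hkJ, if_pos (List.mem_cons_of_mem _ hkJ), hset k hk, if_neg hkj]
    · rw [if_neg hkJ, hset k hk]
      by_cases hkj : k = j.toNat
      · rw [if_pos hkj, if_pos (show ((k:Int)) ∈ j :: J by
          have hkj' : (k:Int) = j := by omega
          rw [hkj']; exact List.mem_cons_self ..), hkj]
      · have : (k : Int) ∉ (j :: J) := by
          intro h; rcases List.mem_cons.mp h with h | h
          · exact hkj (by omega)
          · exact hkJ h
        rw [if_neg hkj, if_neg this]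

theorem pv_nodup_stride (n : Int) : (PySem.List.pyRange 0 n 10).Nodup := by
  rw [PySem.List.pyRange_of_pos 0 n (by norm_num)]
  exact (List.nodup_range).map (fun a b h => by omega)

-- ===== VERDICT (by name: the statement is the Claim_ definition above) =====
theorem style_transcript_slow_spec : Claim_equal_style_transcript_slow := by
  intro transcript _
  unfold Spec_style_transcript_slow style_transcript_slow style_transcript_slow_alt
  set ws := PySem.Str.split₀ transcript with hws
  simp only [PySem.List.len]
  congr 1
  -- A side: rewrite the branch-appending fold as a map
  have hAeq : (PySem.List.enumerate ws).foldl
      (fun styled iw => if iw.1 % 10 == 0 then styled ++ ["[SLOW ZOOM] " ++ iw.2] else styled ++ [iw.2]) [] =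
      (PySem.List.enumerate ws).map (fun iw => if iw.1 % 10 == 0 then "[SLOW ZOOM] " ++ iw.2 else iw.2) := by
    rw [show (fun (styled : List String) (iw : Int × String) =>
        if iw.1 % 10 == 0 then styled ++ ["[SLOW ZOOM] " ++ iw.2] else styled ++ [iw.2]) =
        (fun styled iw => styled ++ [if iw.1 % 10 == 0 then "[SLOW ZOOM] " ++ iw.2 else iw.2])
      from funext fun acc => funext fun iw => by split <;> rfl]
    simpa using pv_foldl_app (PySem.List.enumerate ws)
      (fun iw => if iw.1 % 10 == 0 then "[SLOW ZOOM] " ++ iw.2 else iw.2) []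
  rw [hAeq]
  -- B side: element-wise description of the strided fold
  have hmem : ∀ i ∈ PySem.List.pyRange 0 (ws.length : Int) 10, 0 ≤ i ∧ i < (ws.length : Int) := by
    intro i hi
    rw [PySem.List.mem_pyRange_iff_of_pos (by norm_num : (0:Int) < 10)] at hi
    omega
  obtain ⟨hlen, hget⟩ := pv_fold_set (PySem.List.pyRange 0 (ws.length : Int) 10) ws
    (pv_nodup_stride _) hmem
  apply List.ext_getElem (by rw [hlen]; simp [PySem.List.length_enumerate])
  intro k h1 h2
  have hk : k < ws.length := by simpa [PySem.List.length_enumerate] using h1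
  rw [List.getElem_map, PySem.List.getElem_enumerate ws 0 k (by simpa [PySem.List.length_enumerate])]
  rw [← List.getD_eq_getElem _ "" h2, hget k hk, List.getD_eq_getElem _ "" hk]
  have hiff : ((k : Int) ∈ PySem.List.pyRange 0 (ws.length : Int) 10) ↔ ((0 + (k:Int)) % 10 == 0) = true := by
    rw [PySem.List.mem_pyRange_iff_of_pos (by norm_num : (0:Int) < 10)]
    simp only [beq_iff_eq]
    omega
  by_cases hc : (k : Int) ∈ PySem.List.pyRange 0 (ws.length : Int) 10
  · rw [if_pos hc, if_pos (hiff.mp hc)]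
  · rw [if_neg hc, if_neg (fun h => hc (hiff.mpr h))]
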